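-- pv_equiv track=rewrite | github.com/awornpear/project-3-library | proj03library.py | replace_str
-- ===== SOURCE A (Python) =====
-- def replace_str(str1, str2, str3):
--     str4 = ''
--     if str2 not in str1:
--         return str1
--     elif str2 == '':
--         return str3 + str1 + str3
--
--     else:
--         for i, ch in enumerate(str1):
--             if ch == str2[0]:
--                 if str1[i: i+ len(str2)] == str2:
--                     str4 = str1[:i] + str3 + str1[i +len(str2):]
--         return str4
-- ===== SOURCE B (Python) =====
-- def replace_str(str1, str2, str3):
--     if str2 == '':
--         return str3 + str1 + str3
--     i = str1.rfind(str2)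
--     if i == -1:
--         return str1
--     return str1[:i] + str3 + str1[i + len(str2):]
-- ===== Notes on version B (the rewrite author's own statement) =====
-- stated objective: faster
-- what changed: A scans every position forward and rebuilds the whole spliced string at every match; B locates the last occurrence once with str.rfind and splices once.
import Mathlib
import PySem

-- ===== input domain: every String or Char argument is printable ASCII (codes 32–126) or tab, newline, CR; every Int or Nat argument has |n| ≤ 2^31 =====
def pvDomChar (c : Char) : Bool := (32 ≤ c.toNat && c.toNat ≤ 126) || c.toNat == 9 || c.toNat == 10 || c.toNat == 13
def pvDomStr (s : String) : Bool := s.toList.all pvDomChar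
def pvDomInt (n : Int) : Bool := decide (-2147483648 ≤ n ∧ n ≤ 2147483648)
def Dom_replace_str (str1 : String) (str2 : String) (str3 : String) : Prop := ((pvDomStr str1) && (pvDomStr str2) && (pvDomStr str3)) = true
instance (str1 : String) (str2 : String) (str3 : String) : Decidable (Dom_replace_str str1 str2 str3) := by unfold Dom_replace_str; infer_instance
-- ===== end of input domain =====

-- B replaces A's full forward scan (which re-splices the string at every match) by a single
-- backward search (str.rfind) for the last occurrence followed by one splice.


-- ===== PORT A =====
-- literal transliteration of A: guard `str2 not in str1`, then `str2 == ''`, then the forward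
-- enumerate loop that overwrites str4 with a fresh splice at every match (so the last match wins).
def replace_str (str1 : String) (str2 : String) (str3 : String) : String :=
  if PySem.Str.isIn str2 str1 = false then str1
  else if str2 = "" then String.ofList (str3.toList ++ str1.toList ++ str3.toList)
  else
    String.ofList ((PySem.List.enumerate str1.toList 0).foldl
      (fun str4 ic =>
        if PySem.List.pyGet? str2.toList 0 = some ic.2 then  -- ch == str2[0] (str2 ≠ '' on this branch)
          if PySem.List.slice str1.toList (some ic.1) (some (ic.1 + PySem.Str.len str2)) = str2.toList then
            PySem.List.slice str1.toList none (some ic.1) ++ str3.toList ++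
              PySem.List.slice str1.toList (some (ic.1 + PySem.Str.len str2)) none
          else str4
        else str4) [])

-- ===== PORT B =====
-- literal transliteration of B (Source B): empty-str2 guard, then str1.rfind(str2) and one splice.
def replace_str_alt (str1 : String) (str2 : String) (str3 : String) : String :=
  if str2 = "" then String.ofList (str3.toList ++ str1.toList ++ str3.toList)
  else
    let i := PySem.Chars.rfind str1.toList str2.toList
    if i = -1 then str1
    else String.ofList (PySem.List.slice str1.toList none (some i) ++ str3.toList ++
      PySem.List.slice str1.toList (some (i + PySem.Str.len str2)) none)

-- ===== PRECONDITION & SPEC =====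
def Spec_replace_str (str1 : String) (str2 : String) (str3 : String) (out : String) : Prop := out = replace_str_alt str1 str2 str3
instance (str1 : String) (str2 : String) (str3 : String) (out : String) : Decidable (Spec_replace_str str1 str2 str3 out) := by unfold Spec_replace_str; infer_instance

-- ===== CLAIM (what is proved, stated in full; the proofs are below) =====
def Claim_equal_replace_str : Prop := ∀ (str1 : String) (str2 : String) (str3 : String), Dom_replace_str str1 str2 str3 → Spec_replace_str str1 str2 str3 (replace_str str1 str2 str3)

-- ===== LEMMAS AND PROOFS =====

-- the positions (ascending) at which t occurs in s
def pvHits (s t : List Char) : List Nat :=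
  (List.range s.length).filter (fun k => t.isPrefixOf (List.drop k s))

-- a fold that overwrites its accumulator on every hit returns the value of the LAST hit
lemma pv_foldl_last {α β : Type} (p : α → Prop) [DecidablePred p] (g : α → β) :
    ∀ (l : List α) (init : β),
      l.foldl (fun acc x => if p x then g x else acc) init
        = ((l.filter (fun x => decide (p x))).getLast?).elim init g := by
  intro l
  induction l with
  | nil => intro init; simp
  | cons x l ih =>
    intro init
    by_cases hx : p x
    · rcases h : (l.filter (fun x => decide (p x))).getLast? with _ | y
      · simp [List.foldl_cons, hx, ih, List.getLast?_cons,
          List.getLast?_eq_none_iff.mp h]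
      · simp [List.foldl_cons, hx, ih, h, List.getLast?_cons]
    · simp [List.foldl_cons, hx, ih]

-- A's loop condition at position k holds iff t is a prefix of s.drop k
lemma pv_cond_iff (s t : List Char) (ht : t ≠ []) (k : Nat) (d : Char) (hk : k < s.length) :
    ((PySem.List.pyGet? t 0 = some (PySem.List.pyGetD s (k : Int) d)) ∧
      PySem.List.slice s (some (k : Int)) (some ((k : Int) + (t.length : Int))) = t)
      ↔ t.isPrefixOf (List.drop k s) = true := by
  rw [PySem.List.slice_natCast_add, List.isPrefixOf_iff_prefix]
  constructor
  · rintro ⟨-, h2⟩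
    exact List.prefix_iff_eq_take.mpr h2.symm
  · intro hp
    have h2 : (s.drop k).take t.length = t := (List.prefix_iff_eq_take.mp hp).symm
    refine ⟨?_, h2⟩
    rcases t with _ | ⟨c, t'⟩
    · exact absurd rfl ht
    · have hd : (s.drop k)[0]? = some c := by
        rcases hp with ⟨r, hr⟩
        simp [← hr]
      have hsk : s[k]? = some c := by
        simpa [List.getElem?_drop] using hd
      have hv : s[k] = c := by simpa [List.getElem?_eq_getElem hk] using hsk
      simp [PySem.List.pyGet?, PySem.List.pyIdx?, PySem.List.pyGetD, hk, hv]

-- A's whole loop computes g of the last hit (or init if there is none)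
lemma pv_loop_eq (s t : List Char) (ht : t ≠ []) (g : Int → List Char) (init : List Char) :
    (PySem.List.enumerate s 0).foldl
      (fun acc ic =>
        if PySem.List.pyGet? t 0 = some ic.2 then
          if PySem.List.slice s (some ic.1) (some (ic.1 + (t.length : Int))) = t then g ic.1
          else acc
        else acc) init
      = ((pvHits s t).getLast?).elim init (fun k => g (k : Int)) := by
  have hbody : (fun (acc : List Char) (ic : Int × Char) =>
        if PySem.List.pyGet? t 0 = some ic.2 then
          if PySem.List.slice s (some ic.1) (some (ic.1 + (t.length : Int))) = t then g ic.1
          else acc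
        else acc)
      = (fun acc ic =>
        if (PySem.List.pyGet? t 0 = some ic.2 ∧
            PySem.List.slice s (some ic.1) (some (ic.1 + (t.length : Int))) = t) then g ic.1
        else acc) := by
    funext acc ic
    split_ifs with h1 h2 h3 <;> tauto
  rw [hbody, pv_foldl_last]
  have henum : PySem.List.enumerate s 0
      = (List.range s.length).map (fun (k : Nat) => ((k : Int), PySem.List.pyGetD s (k : Int) 'a')) := by
    rw [PySem.List.enumerate_eq_map_pyRange s 'a', PySem.List.pyRange_one, List.map_map]
    refine List.map_congr_left (fun k _ => ?_)
    simp only [Function.comp_apply, zero_add]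
  rw [henum, List.filter_map]
  have hfc : (List.range s.length).filter
        ((fun ic => decide (PySem.List.pyGet? t 0 = some ic.2 ∧
            PySem.List.slice s (some ic.1) (some (ic.1 + (t.length : Int))) = t)) ∘
          (fun (k : Nat) => ((k : Int), PySem.List.pyGetD s (k : Int) 'a')))
      = pvHits s t := by
    unfold pvHits
    apply List.filter_congr
    intro k hk
    have hk' : k < s.length := List.mem_range.mp hk
    simp only [Function.comp]
    rw [decide_eq_decide.mpr]
    · exact Bool.decide_coe _
    · exact pv_cond_iff s t ht k 'a' hk'
  rw [hfc, List.getLast?_map]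
  rcases (pvHits s t).getLast? with _ | y <;> simp

-- rfind's countdown scan returns the last hit at or below j (or -1)
lemma pv_go_eq (s t : List Char) : ∀ (j : Nat),
    PySem.Chars.rfind.go s t j
      = (((List.range (j+1)).filter (fun k => t.isPrefixOf (List.drop k s))).getLast?).elim
          (-1) (fun k => (k : Int)) := by
  intro j
  induction j with
  | zero => simp [PySem.Chars.rfind.go, List.range_succ, List.filter_cons]
            split_ifs <;> simp_all
  | succ j ih =>
    rw [PySem.Chars.rfind.go]
    by_cases hp : t.isPrefixOf (List.drop (j+1) s)
    · simp [hp, List.range_succ (n := j+1), List.filter_append, List.getLast?_append]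
    · simp only [hp, ih]
      rw [List.range_succ (n := j+1), List.filter_append, List.getLast?_append]
      simp [hp]

-- rfind returns the last hit (or -1)
lemma pv_rfind_eq (s t : List Char) (ht : t ≠ []) :
    PySem.Chars.rfind s t = ((pvHits s t).getLast?).elim (-1) (fun k => (k : Int)) := by
  rw [PySem.Chars.rfind, pv_go_eq, List.range_succ, List.filter_append]
  simp [pvHits, List.drop_length, ht]

-- `t in s` is false iff there are no hits (for t ≠ [])
lemma pv_isIn_false_iff (s t : List Char) (ht : t ≠ []) :
    PySem.Chars.isIn t s = false ↔ pvHits s t = [] := by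
  rw [PySem.Chars.isIn_eq_false_iff]
  unfold pvHits
  rw [List.filter_eq_nil_iff]
  constructor
  · intro h k hk hpk
    exact h (List.IsInfix.trans (List.isPrefixOf_iff_prefix.mp hpk).isInfix
      (List.drop_suffix k s).isInfix)
  · intro h hinf
    rcases hinf with ⟨pre, suf, hEq⟩
    refine h pre.length ?_ ?_
    · rw [List.mem_range, ← hEq]
      have : 0 < t.length := List.length_pos_iff.mpr ht
      simp [List.length_append]; omega
    · rw [← hEq, List.append_assoc, List.drop_left, List.isPrefixOf_iff_prefix]
      exact ⟨suf, rfl⟩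

-- ===== VERDICT (by name: the statement is the Claim_ definition above) =====
theorem replace_str_spec : Claim_equal_replace_str := by
  intro str1 str2 str3 _
  show replace_str str1 str2 str3 = replace_str_alt str1 str2 str3
  unfold replace_str replace_str_alt
  by_cases h2 : str2 = ""
  · subst h2
    simp [PySem.Str.isIn_eq, PySem.Chars.isIn_nil]
  · have ht : str2.toList ≠ [] := fun h => h2 (String.toList_eq_nil_iff.mp h)
    by_cases hin : PySem.Str.isIn str2 str1 = false
    · have hhits : pvHits str1.toList str2.toList = [] :=
        (pv_isIn_false_iff _ _ ht).mp (by simpa [PySem.Str.isIn_eq] using hin)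
      rw [if_pos hin, if_neg h2]
      rw [pv_rfind_eq _ _ ht, hhits]
      simp
    · rw [if_neg hin, if_neg h2, if_neg h2]
      have hlen : PySem.Str.len str2 = (str2.toList.length : Int) := by
        simp [PySem.Str.len_eq, PySem.Chars.len_eq]
      rw [hlen]
      rw [pv_loop_eq str1.toList str2.toList ht
        (fun i => PySem.List.slice str1.toList none (some i) ++ str3.toList ++
          PySem.List.slice str1.toList (some (i + (str2.toList.length : Int))) none) []]
      rw [pv_rfind_eq _ _ ht]
      rcases h : (pvHits str1.toList str2.toList).getLast? with _ | y
      · exact absurd ((pv_isIn_false_iff _ _ ht).mpr (List.getLast?_eq_none_iff.mp h))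
          (by simpa [PySem.Str.isIn_eq] using hin)
      · have hy : ((y : Int) = -1) = False := by simp
        simp [hy]
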